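-- pv_equiv track=rewrite | github.com/Lajapathy-S/Smart_advisor | src/frontend/app.py | _clip_program_page_text
-- ===== SOURCE A (Python) =====
-- _COURSE_SECTION_MARKERS = (
--     "Course Requirements",
--     "Course requirements",
--     "Degree Requirements",
--     "degree requirements",
--     "Required courses:",
--     "Core Courses:",
--     "Core courses:",
-- )
--
-- _PROGRAM_PAGE_MAX_CHARS = 52000
--
-- def _clip_program_page_text(raw: str, max_chars: int = _PROGRAM_PAGE_MAX_CHARS) -> str:
--     """Prefer text from degree/course sections so scraping isn't dominated by faculty lists."""
--     if not raw or len(raw) <= max_chars: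
--         return raw[:max_chars] if len(raw) > max_chars else raw
--     best_start = -1
--     for marker in _COURSE_SECTION_MARKERS:
--         idx = raw.find(marker)
--         if idx >= 0 and (best_start < 0 or idx < best_start):
--             best_start = idx
--     if best_start > 1500:
--         raw = raw[best_start:]
--     return raw[:max_chars]
-- ===== SOURCE B (Python) =====
-- _COURSE_SECTION_MARKERS = (
--     "Course Requirements",
--     "Course requirements",
--     "Degree Requirements",
--     "degree requirements",
--     "Required courses:",
--     "Core Courses:",
--     "Core courses:",
-- )
--
-- _PROGRAM_PAGE_MAX_CHARS = 52000
--
--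
-- def _clip_program_page_text(raw: str, max_chars: int = _PROGRAM_PAGE_MAX_CHARS) -> str:
--     """Prefer text from degree/course sections so scraping isn't dominated by faculty lists."""
--     if len(raw) <= max_chars:
--         return raw
--     # Single left-to-right scan: the first position at which ANY marker starts
--     # (instead of one full .find pass per marker and a running minimum).
--     best_start = -1
--     for i in range(len(raw)):
--         if any(raw.startswith(marker, i) for marker in _COURSE_SECTION_MARKERS):
--             best_start = i
--             break
--     if best_start > 1500:
--         raw = raw[best_start:]
--     return raw[:max_chars]
-- ===== Notes on version B (the rewrite author's own statement) =====
-- stated objective: alternative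
-- what changed: Replaces the per-marker loop of full str.find passes with a running minimum by one single left-to-right scan that stops at the first position where any of the 7 markers starts (the guards and clipping are unchanged; the redundant empty-string branch disappears).
import Mathlib
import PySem

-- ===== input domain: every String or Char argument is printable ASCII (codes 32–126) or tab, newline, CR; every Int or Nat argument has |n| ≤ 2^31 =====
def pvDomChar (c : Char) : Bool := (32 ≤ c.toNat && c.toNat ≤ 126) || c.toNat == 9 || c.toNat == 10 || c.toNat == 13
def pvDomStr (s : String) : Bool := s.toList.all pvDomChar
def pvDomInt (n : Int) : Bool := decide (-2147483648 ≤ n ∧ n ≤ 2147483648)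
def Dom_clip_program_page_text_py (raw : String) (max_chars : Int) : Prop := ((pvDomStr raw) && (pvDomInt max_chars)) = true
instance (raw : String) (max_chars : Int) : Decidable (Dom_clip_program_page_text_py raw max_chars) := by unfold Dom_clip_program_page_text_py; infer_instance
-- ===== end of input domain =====

-- B replaces A's per-marker str.find passes (with a running minimum) by one left-to-right
-- scan stopping at the first position where any marker starts; guards and clipping unchanged.


def pvMarkers : List String :=
  ["Course Requirements", "Course requirements", "Degree Requirements",
   "degree requirements", "Required courses:", "Core Courses:", "Core courses:"]

-- ===== PORT A =====
def clip_program_page_text_py (raw : String) (max_chars : Int) : String :=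
  if raw = "" ∨ PySem.Str.len raw ≤ max_chars then
    if max_chars < PySem.Str.len raw then PySem.Str.slice raw none (some max_chars) else raw
  else
    let best_start := pvMarkers.foldl (fun best_start marker =>
      let idx := PySem.Str.find raw marker
      if 0 ≤ idx ∧ (best_start < 0 ∨ idx < best_start) then idx else best_start) (-1)
    let raw2 := if 1500 < best_start then PySem.Str.slice raw (some best_start) none else raw
    PySem.Str.slice raw2 none (some max_chars)

-- ===== PORT B =====
-- any(raw.startswith(marker, i) ...): does some marker start at this suffix?  (exact:
-- Python's startswith(m, i) with 0 ≤ i ≤ len(raw) is 'm is a prefix of the i-th suffix')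
def pvMarkerAt (t : List Char) : Bool :=
  pvMarkers.any (fun marker => marker.toList.isPrefixOf t)

-- the 'for i in range(len(raw)) … break' scan, as recursion over the suffixes of raw
def pvFirstMarker : List Char → Int → Int
  | [], _ => -1
  | c :: rest, i => if pvMarkerAt (c :: rest) then i else pvFirstMarker rest (i + 1)

def clip_program_page_text_py_alt (raw : String) (max_chars : Int) : String :=
  if PySem.Str.len raw ≤ max_chars then raw
  else
    let best_start := pvFirstMarker raw.toList 0
    let raw2 := if 1500 < best_start then PySem.Str.slice raw (some best_start) none else raw
    PySem.Str.slice raw2 none (some max_chars)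

-- ===== PRECONDITION & SPEC =====
def Spec_clip_program_page_text_py (raw : String) (max_chars : Int) (out : String) : Prop := out = clip_program_page_text_py_alt raw max_chars
instance (raw : String) (max_chars : Int) (out : String) : Decidable (Spec_clip_program_page_text_py raw max_chars out) := by unfold Spec_clip_program_page_text_py; infer_instance

-- ===== CLAIM (what is proved, stated in full; the proofs are below) =====
def Claim_equal_clip_program_page_text_py : Prop := ∀ (raw : String) (max_chars : Int), Dom_clip_program_page_text_py raw max_chars → Spec_clip_program_page_text_py raw max_chars (clip_program_page_text_py raw max_chars)

-- ===== LEMMAS AND PROOFS =====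

lemma pvMarkerAt_iff (t : List Char) :
    pvMarkerAt t = true ↔ ∃ m ∈ pvMarkers, m.toList <+: t := by
  simp [pvMarkerAt, List.any_eq_true, List.isPrefixOf_iff_prefix]

-- no marker anywhere → the scan returns -1
lemma pvFirstMarker_none : ∀ (s : List Char), (∀ j, pvMarkerAt (s.drop j) = false) →
    ∀ k, pvFirstMarker s k = -1 := by
  intro s
  induction s with
  | nil => intro _ k; rfl
  | cons c rest ih =>
      intro h k
      have h0 := h 0
      simp only [List.drop_zero] at h0
      simp only [pvFirstMarker, h0, if_false, Bool.false_eq_true]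
      exact ih (fun j => h (j + 1)) (k + 1)

-- n is the first matching position → the scan returns k + n
lemma pvFirstMarker_found : ∀ (s : List Char) (k : Int) (n : Nat),
    pvMarkerAt (s.drop n) = true → (∀ i < n, pvMarkerAt (s.drop i) = false) →
    pvFirstMarker s k = k + n := by
  intro s
  induction s with
  | nil =>
      intro k n h _
      simp only [List.drop_nil] at h
      exact absurd h (by decide)
  | cons c rest ih =>
      intro k n h hmin
      by_cases h0 : pvMarkerAt (c :: rest) = true
      · have hn : n = 0 := by
          by_contra hne
          have := hmin 0 (Nat.pos_of_ne_zero hne)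
          simp only [List.drop_zero] at this
          simp [this] at h0
        subst hn
        simp [pvFirstMarker, h0]
      · have hn : n ≠ 0 := by
          intro hz; subst hz; simp only [List.drop_zero] at h; exact h0 h
        obtain ⟨n', rfl⟩ := Nat.exists_eq_succ_of_ne_zero hn
        have hb : pvMarkerAt (c :: rest) = false := by
          cases hx : pvMarkerAt (c :: rest) with
          | false => rfl
          | true => exact absurd hx h0
        simp only [pvFirstMarker, hb, Bool.false_eq_true, if_false]
        have h' : pvMarkerAt (rest.drop n') = true := by
          simpa using h
        have hmin' : ∀ i < n', pvMarkerAt (rest.drop i) = false := by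
          intro i hi
          have := hmin (i + 1) (by omega)
          simpa using this
        have := ih (k + 1) n' h' hmin'
        rw [this]; push_cast; ring

-- A's per-marker running-minimum step, named for the proofs
def pvStep (s : List Char) (b : Int) (m : String) : Int :=
  let idx := PySem.Chars.find s m.toList
  if 0 ≤ idx ∧ (b < 0 ∨ idx < b) then idx else b

-- characterisation of A's running-minimum fold over the markers
lemma pvFold_spec (s : List Char) : ∀ (ms : List String) (acc : Int),
    (ms.foldl (pvStep s) acc = acc ∨
      ∃ m ∈ ms, ms.foldl (pvStep s) acc = PySem.Chars.find s m.toList ∧ 0 ≤ ms.foldl (pvStep s) acc) ∧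
    (∀ m ∈ ms, 0 ≤ PySem.Chars.find s m.toList →
        0 ≤ ms.foldl (pvStep s) acc ∧ ms.foldl (pvStep s) acc ≤ PySem.Chars.find s m.toList) ∧
    (0 ≤ acc → ms.foldl (pvStep s) acc ≤ acc) := by
  intro ms
  induction ms with
  | nil => intro acc; exact ⟨Or.inl rfl, by simp, fun _ => le_refl _⟩
  | cons m0 ms' ih =>
      intro acc
      rw [List.foldl_cons]
      obtain ⟨ih1, ih2, ih3⟩ := ih (pvStep s acc m0)
      by_cases hc : 0 ≤ PySem.Chars.find s m0.toList ∧ (acc < 0 ∨ PySem.Chars.find s m0.toList < acc)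
      · have hstep : pvStep s acc m0 = PySem.Chars.find s m0.toList := by
          simp only [pvStep]; rw [if_pos hc]
        rw [hstep] at ih1 ih2 ih3
        have h0 : 0 ≤ ms'.foldl (pvStep s) (PySem.Chars.find s m0.toList) := by
          rcases ih1 with h | ⟨_, _, _, hge⟩
          · rw [h]; exact hc.1
          · exact hge
        rw [hstep]
        refine ⟨?_, ?_, ?_⟩
        · rcases ih1 with h | ⟨m, hm, he, hge⟩
          · exact Or.inr ⟨m0, List.mem_cons_self, h, h0⟩
          · exact Or.inr ⟨m, List.mem_cons_of_mem _ hm, he, hge⟩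
        · intro m hm _
          rcases List.mem_cons.mp hm with rfl | hm'
          · exact ⟨h0, ih3 hc.1⟩
          · exact ih2 m hm' ‹0 ≤ PySem.Chars.find s m.toList›
        · intro hacc
          have h1 : PySem.Chars.find s m0.toList < acc := by
            rcases hc.2 with h | h
            · omega
            · exact h
          exact le_trans (ih3 hc.1) (le_of_lt h1)
      · have hstep : pvStep s acc m0 = acc := by
          simp only [pvStep]; rw [if_neg hc]
        rw [hstep] at ih1 ih2 ih3
        rw [hstep]
        refine ⟨?_, ?_, ?_⟩
        · rcases ih1 with h | ⟨m, hm, he, hge⟩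
          · exact Or.inl h
          · exact Or.inr ⟨m, List.mem_cons_of_mem _ hm, he, hge⟩
        · intro m hm hf
          rcases List.mem_cons.mp hm with rfl | hm'
          · have hle : 0 ≤ acc ∧ acc ≤ PySem.Chars.find s m.toList := by
              push_neg at hc
              exact hc hf
            have h0 : 0 ≤ ms'.foldl (pvStep s) acc := by
              rcases ih1 with h | ⟨_, _, _, hge⟩
              · rw [h]; exact hle.1
              · exact hge
            exact ⟨h0, le_trans (ih3 hle.1) hle.2⟩
          · exact ih2 m hm' hf
        · exact ih3

-- A's best_start equals B's scan result
lemma pvBest_eq (raw : String) :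
    pvMarkers.foldl (fun best_start marker =>
      let idx := PySem.Str.find raw marker
      if 0 ≤ idx ∧ (best_start < 0 ∨ idx < best_start) then idx else best_start) (-1)
    = pvFirstMarker raw.toList 0 := by
  have hrw : (fun (best_start : Int) (marker : String) =>
      let idx := PySem.Str.find raw marker
      if 0 ≤ idx ∧ (best_start < 0 ∨ idx < best_start) then idx else best_start)
      = pvStep raw.toList := by
    funext b m; simp [pvStep, PySem.Str.find_eq]
  rw [hrw]
  set s := raw.toList with hs
  obtain ⟨h1, h2, h3⟩ := pvFold_spec s pvMarkers (-1)
  by_cases hx : ∃ j, pvMarkerAt (s.drop j) = true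
  · set n := Nat.find hx with hn
    have hPn : pvMarkerAt (s.drop n) = true := Nat.find_spec hx
    have hmin : ∀ i < n, pvMarkerAt (s.drop i) = false := by
      intro i hi
      have := Nat.find_min hx hi
      cases hb : pvMarkerAt (s.drop i) with
      | false => rfl
      | true => exact absurd hb this
    rw [pvFirstMarker_found s 0 n hPn hmin, zero_add]
    obtain ⟨m0, hm0, hpre0⟩ := (pvMarkerAt_iff _).mp hPn
    have hfind0 : 0 ≤ PySem.Chars.find s m0.toList := by
      rw [PySem.Chars.find_nonneg_iff]
      exact List.infix_iff_prefix_suffix.mpr ⟨_, hpre0, List.drop_suffix n s⟩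
    obtain ⟨hr0, hrle⟩ := h2 m0 hm0 hfind0
    have hfle : PySem.Chars.find s m0.toList ≤ (n : Int) := by
      by_contra hlt
      push_neg at hlt
      have := (PySem.Chars.find_spec hfind0).2 n (by omega)
      exact this hpre0
    rcases h1 with h | ⟨m1, hm1, he1, hge1⟩
    · omega
    · have hspec := PySem.Chars.find_spec (he1 ▸ hge1)
      have hP : pvMarkerAt (s.drop (PySem.Chars.find s m1.toList).toNat) = true := by
        rw [pvMarkerAt_iff]
        exact ⟨m1, hm1, hspec.1⟩
      have hnle : n ≤ (PySem.Chars.find s m1.toList).toNat := Nat.find_le hP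
      omega
  · push_neg at hx
    have hfalse : ∀ j, pvMarkerAt (s.drop j) = false := by
      intro j
      cases hb : pvMarkerAt (s.drop j) with
      | false => rfl
      | true => exact absurd hb (hx j)
    rw [pvFirstMarker_none s hfalse 0]
    rcases h1 with h | ⟨m, hm, he, hge⟩
    · exact h
    · exfalso
      have hinf : m.toList <:+: s := (PySem.Chars.find_nonneg_iff s m.toList).mp (he ▸ hge)
      obtain ⟨pre, suf, hps⟩ := hinf
      have hdrop : s.drop pre.length = m.toList ++ suf := by
        rw [← hps, List.append_assoc]
        exact List.drop_left' rfl
      have hpd : m.toList <+: s.drop pre.length := by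
        rw [hdrop]
        exact List.prefix_append _ _
      have := (pvMarkerAt_iff _).mpr ⟨m, hm, hpd⟩
      rw [hfalse pre.length] at this
      exact absurd this (by decide)

-- ===== VERDICT (by name: the statement is the Claim_ definition above) =====
theorem clip_program_page_text_py_spec : Claim_equal_clip_program_page_text_py := by
  intro raw max_chars _
  unfold Spec_clip_program_page_text_py clip_program_page_text_py clip_program_page_text_py_alt
  by_cases hlen : PySem.Str.len raw ≤ max_chars
  · have hlen' : (raw.length : Int) ≤ max_chars := by
      simpa [PySem.Str.len_eq] using hlen
    have h2 : ¬ max_chars < (raw.length : Int) := by omega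
    simp [PySem.Str.len_eq, hlen', h2]
  · by_cases hemp : raw = ""
    · subst hemp
      have h0 : ("" : String).length = 0 := rfl
      have hlen' : ¬ (("" : String).length : Int) ≤ max_chars := by
        simpa [PySem.Str.len_eq] using hlen
      have hmc : max_chars < 0 := by rw [h0] at hlen'; omega
      have hns : ¬ (1500 : Int) < (-1 : Int) := by decide
      simp [PySem.Str.len_eq, hmc]
      rw [if_neg (by omega : ¬ (0 : Int) ≤ max_chars)]
      rw [show pvFirstMarker ([] : List Char) 0 = (-1 : Int) from rfl, if_neg hns]
    · rw [if_neg (by tauto : ¬ (raw = "" ∨ PySem.Str.len raw ≤ max_chars)), if_neg hlen]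
      simp only [pvBest_eq raw]
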